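-- pv_equiv track=rewrite | github.com/youth-of-may/Hangman-ConsoleGame | hangman.py | hyphenize
-- ===== SOURCE A (Python) =====
-- def hyphenize(word):
--     hyphen = ''
--     hyphenArray = []
--     wordCount= 0
--     for i in word:
--         hyphen+='-'
--         hyphenArray.append('-')
--         wordCount+=1
--     return hyphen, hyphenArray, wordCount
-- ===== SOURCE B (Python) =====
-- def hyphenize(word):
--     n = len(word)
--     return '-' * n, ['-'] * n, n
-- ===== Notes on version B (the rewrite author's own statement) =====
-- stated objective: simpler
-- what changed: Replaced the per-character accumulation loop by three closed-form expressions ('-'*n, ['-']*n, n) computed from len(word) alone.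
import Mathlib
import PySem

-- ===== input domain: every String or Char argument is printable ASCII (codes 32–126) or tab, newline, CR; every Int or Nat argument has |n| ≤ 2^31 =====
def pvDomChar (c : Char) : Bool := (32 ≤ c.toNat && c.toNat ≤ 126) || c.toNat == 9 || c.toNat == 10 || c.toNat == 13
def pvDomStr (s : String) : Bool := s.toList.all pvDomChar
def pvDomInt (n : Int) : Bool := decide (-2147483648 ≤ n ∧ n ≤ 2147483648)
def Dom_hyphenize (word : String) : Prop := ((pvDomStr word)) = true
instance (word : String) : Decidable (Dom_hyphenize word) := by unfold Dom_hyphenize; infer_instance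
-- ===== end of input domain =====

-- B replaces A's character-by-character loop with closed-form replicate/length expressions.


-- ===== PORT A =====
-- literal transliteration: fold over the word's characters accumulating
-- the hyphen string, the hyphen list (appended at the back), and the count
def hyphenize (word : String) : String × List String × Int :=
  word.toList.foldl
    (fun (st : String × List String × Int) _ =>
      (st.1 ++ "-", st.2.1 ++ ["-"], st.2.2 + 1))
    ("", [], 0)

-- ===== PORT B =====
-- closed form from the length alone, no per-character traversal
def hyphenize_alt (word : String) : String × List String × Int :=
  let n := word.toList.length
  (String.ofList (List.replicate n '-'), List.replicate n "-", (n : Int))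

-- ===== PRECONDITION & SPEC =====
def Spec_hyphenize (word : String) (out : String × List String × Int) : Prop := out = hyphenize_alt word
instance (word : String) (out : String × List String × Int) : Decidable (Spec_hyphenize word out) := by unfold Spec_hyphenize; infer_instance

-- ===== CLAIM (what is proved, stated in full; the proofs are below) =====
def Claim_equal_hyphenize : Prop := ∀ (word : String), Dom_hyphenize word → Spec_hyphenize word (hyphenize word)

-- ===== LEMMAS AND PROOFS =====

-- loop invariant: folding A's step over any list l from state (s, a, k)
-- appends length l hyphens to each component
theorem hyphenize_foldl (l : List Char) (s : String) (a : List String) (k : Int) :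
    l.foldl (fun (st : String × List String × Int) _ =>
        (st.1 ++ "-", st.2.1 ++ ["-"], st.2.2 + 1)) (s, a, k)
    = (s ++ String.ofList (List.replicate l.length '-'),
       a ++ List.replicate l.length "-",
       k + l.length) := by
  induction l generalizing s a k with
  | nil => simp
  | cons c t ih =>
      simp only [List.foldl_cons, List.length_cons, ih]
      refine Prod.ext ?_ (Prod.ext ?_ ?_)
      · show s ++ "-" ++ String.ofList (List.replicate t.length '-')
            = s ++ String.ofList (List.replicate (t.length + 1) '-')
        have h : String.ofList (List.replicate (t.length + 1) '-')
            = "-" ++ String.ofList (List.replicate t.length '-') := by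
          rw [List.replicate_succ,
            show ('-' :: List.replicate t.length '-')
              = ['-'] ++ List.replicate t.length '-' from rfl,
            String.ofList_append]
        rw [h, String.append_assoc]
      · simp [List.replicate_succ]
      · push_cast; ring

-- ===== VERDICT (by name: the statement is the Claim_ definition above) =====
theorem hyphenize_spec : Claim_equal_hyphenize := by
  intro word _
  show hyphenize word = hyphenize_alt word
  simp [hyphenize, hyphenize_alt, hyphenize_foldl]
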